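-- pv_equiv track=rewrite | github.com/Tony-Yeung19/Duplicate-_1 | AI_DnD_DM-main/AI_Project/testing/create_training_data.py | expand_command
-- ===== SOURCE A (Python) =====
-- def expand_command(command):
--     """Expand abbreviated commands for better training"""
--     expansions = {
--         '!a ': '!attack ',
--         '!cast ': '!cast ',
--         '!i ': '!initiative ',
--         '!save ': '!save ',
--         '!check ': '!check '
--     }
--
--     for short, full in expansions.items():
--         if command.startswith(short):
--             return command.replace(short, full, 1)
--     return command
-- ===== SOURCE B (Python) =====
-- def expand_command(command):
--     """Expand abbreviated commands for better training"""
--     token, sep, rest = command.partition(' ')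
--     if sep:
--         if token == '!a':
--             return '!attack ' + rest
--         if token == '!i':
--             return '!initiative ' + rest
--     return command
-- ===== Notes on version B (the rewrite author's own statement) =====
-- stated objective: idiomatic
-- what changed: Replaces the five-way prefix-scan-and-replace(…,1) loop with a single partition of the command at its first space and a direct dispatch on the leading token (the three identity entries disappear).
import Mathlib
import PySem

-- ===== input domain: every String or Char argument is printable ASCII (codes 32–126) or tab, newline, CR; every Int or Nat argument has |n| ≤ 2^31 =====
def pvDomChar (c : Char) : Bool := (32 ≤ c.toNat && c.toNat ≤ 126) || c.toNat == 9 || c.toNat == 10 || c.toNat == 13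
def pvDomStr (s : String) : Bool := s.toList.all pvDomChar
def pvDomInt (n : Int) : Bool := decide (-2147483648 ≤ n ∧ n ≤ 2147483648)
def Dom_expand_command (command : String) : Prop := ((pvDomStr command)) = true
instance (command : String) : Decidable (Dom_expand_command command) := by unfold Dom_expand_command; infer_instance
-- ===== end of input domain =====

-- B replaces A's five-way prefix-scan-and-replace loop by one partition at the first space
-- plus a direct dispatch on the leading token (idiomatic; same return value everywhere).

-- ===== PORT A =====
-- hand-port of Python's s.replace(old, new, 1) over code points (exact: scan for the
-- first occurrence of old, replace it, keep the rest; empty old inserts new in front)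
def pvReplace1 (s old new : List Char) : List Char :=
  match s with
  | [] => if old.isEmpty then new else []
  | c :: rest =>
      if old.isPrefixOf (c :: rest) then new ++ (c :: rest).drop old.length
      else c :: pvReplace1 rest old new

def pvExpansions : List (List Char × List Char) :=
  [("!a ".toList, "!attack ".toList),
   ("!cast ".toList, "!cast ".toList),
   ("!i ".toList, "!initiative ".toList),
   ("!save ".toList, "!save ".toList),
   ("!check ".toList, "!check ".toList)]

-- the for-loop over expansions.items() with its early return
def pvExpandLoop (command : List Char) : List (List Char × List Char) → List Char
  | [] => command
  | (short, full) :: rest =>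
      if short.isPrefixOf command then pvReplace1 command short full
      else pvExpandLoop command rest

def expand_command (command : String) : String :=
  String.ofList (pvExpandLoop command.toList pvExpansions)

-- ===== PORT B =====
-- hand-port of command.partition(' ') over code points (exact for the one-char separator):
-- (part before the first space, whether a space occurred, part after it)
def pvPartSpace : List Char → List Char × Bool × List Char
  | [] => ([], false, [])
  | c :: rest =>
      if c = ' ' then ([], true, rest)
      else
        let p := pvPartSpace rest
        (c :: p.1, p.2.1, p.2.2)

def pvAltGo (cs : List Char) : List Char :=
  let p := pvPartSpace cs
  if p.2.1 then
    if p.1 = "!a".toList then "!attack ".toList ++ p.2.2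
    else if p.1 = "!i".toList then "!initiative ".toList ++ p.2.2
    else cs
  else cs

def expand_command_alt (command : String) : String :=
  String.ofList (pvAltGo command.toList)

-- ===== PRECONDITION & SPEC =====
def Spec_expand_command (command : String) (out : String) : Prop := out = expand_command_alt command
instance (command : String) (out : String) : Decidable (Spec_expand_command command out) := by unfold Spec_expand_command; infer_instance

-- ===== CLAIM (what is proved, stated in full; the proofs are below) =====
def Claim_equal_expand_command : Prop := ∀ (command : String), Dom_expand_command command → Spec_expand_command command (expand_command command)

-- ===== LEMMAS AND PROOFS =====

lemma pvPartSpace_true : ∀ (cs t r : List Char), pvPartSpace cs = (t, true, r) → cs = t ++ ' ' :: r := by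
  intro cs
  induction cs with
  | nil => intro t r h; simp [pvPartSpace] at h
  | cons c rest ih =>
      intro t r h
      by_cases hc : c = ' '
      · subst hc
        simp [pvPartSpace] at h
        obtain ⟨rfl, rfl⟩ := h
        simp
      · rcases hp : pvPartSpace rest with ⟨t', s', r'⟩
        simp [pvPartSpace, hc, hp] at h
        obtain ⟨ht, hs, hr⟩ := h
        subst ht
        subst hs
        subst hr
        have := ih t' r' hp
        simp [this]

lemma pvIsPrefixOf_false {l cs : List Char} (h : ¬ l <+: cs) : l.isPrefixOf cs = false := by
  rw [Bool.eq_false_iff]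
  intro hb
  exact h (List.isPrefixOf_iff_prefix.mp hb)

lemma pvMain (cs : List Char) : pvExpandLoop cs pvExpansions = pvAltGo cs := by
  by_cases h1 : "!a ".toList <+: cs
  · obtain ⟨r, rfl⟩ := h1
    simp [pvExpansions, pvExpandLoop, pvReplace1, pvAltGo, pvPartSpace, List.isPrefixOf]
  by_cases h2 : "!cast ".toList <+: cs
  · obtain ⟨r, rfl⟩ := h2
    simp [pvExpansions, pvExpandLoop, pvReplace1, pvAltGo, pvPartSpace, List.isPrefixOf]
  by_cases h3 : "!i ".toList <+: cs
  · obtain ⟨r, rfl⟩ := h3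
    simp [pvExpansions, pvExpandLoop, pvReplace1, pvAltGo, pvPartSpace, List.isPrefixOf]
  by_cases h4 : "!save ".toList <+: cs
  · obtain ⟨r, rfl⟩ := h4
    simp [pvExpansions, pvExpandLoop, pvReplace1, pvAltGo, pvPartSpace, List.isPrefixOf]
  by_cases h5 : "!check ".toList <+: cs
  · obtain ⟨r, rfl⟩ := h5
    simp [pvExpansions, pvExpandLoop, pvReplace1, pvAltGo, pvPartSpace, List.isPrefixOf]
  -- no prefix matches: both sides return cs
  have hA : pvExpandLoop cs pvExpansions = cs := by
    simp only [pvExpansions, pvExpandLoop,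
      pvIsPrefixOf_false h1, pvIsPrefixOf_false h2, pvIsPrefixOf_false h3,
      pvIsPrefixOf_false h4, pvIsPrefixOf_false h5, Bool.false_eq_true, if_false]
  have hB : pvAltGo cs = cs := by
    rcases hp : pvPartSpace cs with ⟨t, sep, r⟩
    cases sep with
    | false => simp [pvAltGo, hp]
    | true =>
        have hcs := pvPartSpace_true cs t r hp
        by_cases ha : t = "!a".toList
        · exact absurd ⟨r, by simp [hcs, ha]⟩ h1
        by_cases hi : t = "!i".toList
        · exact absurd ⟨r, by simp [hcs, hi]⟩ h3
        · simp only [pvAltGo, hp, if_true]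
          rw [if_neg ha, if_neg hi]
  rw [hA, hB]

-- ===== VERDICT (by name: the statement is the Claim_ definition above) =====
theorem expand_command_spec : Claim_equal_expand_command := by
  intro command _
  unfold Spec_expand_command expand_command expand_command_alt
  exact congrArg String.ofList (pvMain command.toList)
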